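-- pv_equiv track=rewrite | github.com/semicontinuity/datatools | datatools/jt/llmcodec/compressor.py | _tokenize_normal
-- ===== SOURCE A (Python) =====
-- def _is_alnum(c: str) -> bool:
--     return c.isalnum() or c == "_"
--
-- def _tokenize_normal(text: str) -> list[str]:
--     tokens = []
--     i = 0
--     n = len(text)
--     while i < n:
--         is_alnum = _is_alnum(text[i])
--         j = i + 1
--         while j < n and _is_alnum(text[j]) == is_alnum:
--             j += 1
--         tokens.append(text[i:j])
--         i = j
--     return tokens
-- ===== SOURCE B (Python) =====
-- def _is_alnum(c: str) -> bool:
--     return c.isalnum() or c == "_"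
--
-- def _tokenize_normal(text: str) -> list[str]:
--     # Two-pass: materialize the run-boundary index table, then slice between
--     # consecutive boundaries.
--     n = len(text)
--     if n == 0:
--         return []
--     kinds = [_is_alnum(c) for c in text]
--     bounds = [0] + [i for i in range(1, n) if kinds[i] != kinds[i - 1]] + [n]
--     return [text[a:b] for a, b in zip(bounds, bounds[1:])]
-- ===== Notes on version B (the rewrite author's own statement) =====
-- stated objective: alternative
-- what changed: Replaced the nested index while-loops (inner scan finds each run's end) by a two-pass scheme: one pass builds the table of run-boundary indices (positions where the alnum class changes, plus 0 and len), a second pass slices the text between consecutive boundaries.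
import Mathlib
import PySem

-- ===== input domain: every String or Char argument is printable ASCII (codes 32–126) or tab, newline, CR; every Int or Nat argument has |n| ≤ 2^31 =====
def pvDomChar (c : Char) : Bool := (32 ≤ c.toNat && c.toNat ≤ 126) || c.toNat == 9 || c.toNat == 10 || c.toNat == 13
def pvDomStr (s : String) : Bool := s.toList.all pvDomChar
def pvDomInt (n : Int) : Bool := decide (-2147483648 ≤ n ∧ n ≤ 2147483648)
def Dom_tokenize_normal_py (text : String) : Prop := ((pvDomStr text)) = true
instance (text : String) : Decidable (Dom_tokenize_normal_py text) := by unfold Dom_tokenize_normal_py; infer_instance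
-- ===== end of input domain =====

-- B replaces A's nested index while-loops by a boundary-index table plus a slicing pass (alternative decomposition, same cost).

-- ===== PORT A =====
-- _is_alnum: Python str.isalnum ∨ c == "_"; Char.isAlphanum is exact on the ASCII domain
def pvIsAlnum (c : Char) : Bool := c.isAlphanum || c == '_'

-- inner while loop: 'while j < n and _is_alnum(text[j]) == is_alnum: j += 1'
def aScan (cs : List Char) (b : Bool) (j : Nat) : Nat :=
  if h : j < cs.length then
    if pvIsAlnum cs[j] == b then aScan cs b (j + 1) else j
  else j
termination_by cs.length - j

-- needed by aLoop's termination proof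
theorem aScan_ge (cs : List Char) (b : Bool) (j : Nat) : j ≤ aScan cs b j := by
  unfold aScan
  split
  · split
    · have := aScan_ge cs b (j + 1); omega
    · exact le_refl _
  · exact le_refl _
termination_by cs.length - j

-- outer while loop; text[i:j] with 0 ≤ i ≤ j ≤ n is exactly (cs.drop i).take (j - i)
def aLoop (cs : List Char) (i : Nat) : List String :=
  if h : i < cs.length then
    String.ofList ((cs.drop i).take (aScan cs (pvIsAlnum cs[i]) (i + 1) - i)) ::
      aLoop cs (aScan cs (pvIsAlnum cs[i]) (i + 1))
  else []
termination_by cs.length - i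
decreasing_by
  have := aScan_ge cs (pvIsAlnum cs[i]) (i + 1); omega

def tokenize_normal_py (text : String) : List String := aLoop text.toList 0

-- ===== PORT B =====
def tokenize_normal_py_alt (text : String) : List String :=
  let cs := text.toList
  let n := cs.length
  if n = 0 then []
  else
    let kinds := cs.map pvIsAlnum
    let bounds := 0 :: ((List.range' 1 (n - 1)).filter
      (fun i => kinds.getD i false != kinds.getD (i - 1) false)) ++ [n]
    (bounds.zip bounds.tail).map (fun p => String.ofList ((cs.drop p.1).take (p.2 - p.1)))

-- ===== PRECONDITION & SPEC =====
def Spec_tokenize_normal_py (text : String) (out : List String) : Prop := out = tokenize_normal_py_alt text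
instance (text : String) (out : List String) : Decidable (Spec_tokenize_normal_py text out) := by unfold Spec_tokenize_normal_py; infer_instance

-- ===== CLAIM (what is proved, stated in full; the proofs are below) =====
def Claim_equal_tokenize_normal_py : Prop := ∀ (text : String), Dom_tokenize_normal_py text → Spec_tokenize_normal_py text (tokenize_normal_py text)

-- ===== LEMMAS AND PROOFS =====

-- B's boundary predicate (definitionally the lambda in the port)
def pvPred (cs : List Char) (i : Nat) : Bool :=
  (cs.map pvIsAlnum).getD i false != (cs.map pvIsAlnum).getD (i - 1) false

-- B's second pass, as a function of an arbitrary boundary list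
def pairsTok (cs : List Char) (l : List Nat) : List String :=
  (l.zip l.tail).map (fun p => String.ofList ((cs.drop p.1).take (p.2 - p.1)))

theorem pvPred_eq (cs : List Char) (i : Nat) (hi : i < cs.length) (hi1 : i - 1 < cs.length) :
    pvPred cs i = (pvIsAlnum cs[i] != pvIsAlnum cs[i - 1]) := by
  unfold pvPred
  rw [List.getD_eq_getElem _ _ (by simpa using hi), List.getD_eq_getElem _ _ (by simpa using hi1)]
  simp

theorem aScan_le (cs : List Char) (b : Bool) (j : Nat) (h : j ≤ cs.length) :
    aScan cs b j ≤ cs.length := by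
  unfold aScan
  split
  · split
    · exact aScan_le cs b (j + 1) (by omega)
    · omega
  · omega
termination_by cs.length - j

theorem aScan_mem (cs : List Char) (b : Bool) (j k : Nat) (hj : j ≤ k)
    (hk : k < aScan cs b j) (hlen : k < cs.length) :
    pvIsAlnum cs[k] = b := by
  unfold aScan at hk
  split at hk
  · rename_i hjlen
    split at hk
    · rename_i hb
      rcases Nat.eq_or_lt_of_le hj with rfl | hlt
      · simpa using hb
      · exact aScan_mem cs b (j + 1) k hlt hk hlen
    · omega
  · omega
termination_by cs.length - j

theorem aScan_stop (cs : List Char) (b : Bool) (j : Nat) :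
    ∀ (h : aScan cs b j < cs.length), ¬ pvIsAlnum cs[aScan cs b j] = b := by
  unfold aScan
  split
  · split
    · exact aScan_stop cs b (j + 1)
    · rename_i hb
      intro _ hc
      exact hb (by simp [hc])
  · rename_i hj
    intro h
    omega
termination_by cs.length - j

theorem pairsTok_cons (cs : List Char) (a b : Nat) (l : List Nat) :
    pairsTok cs (a :: b :: l) =
      String.ofList ((cs.drop a).take (b - a)) :: pairsTok cs (b :: l) := by
  simp [pairsTok]

-- the bridge: A's outer loop from position i produces exactly B's slices of the
-- boundary table restricted to positions > i
theorem aLoop_eq_pairsTok (cs : List Char) (i : Nat) (hi : i < cs.length) :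
    aLoop cs i =
      pairsTok cs (i :: ((List.range' (i + 1) (cs.length - 1 - i)).filter (pvPred cs) ++ [cs.length])) := by
  rw [aLoop]
  rw [dif_pos hi]
  set n := cs.length with hn
  set b := pvIsAlnum cs[i] with hb
  set j := aScan cs b (i + 1) with hj
  have hij : i + 1 ≤ j := aScan_ge cs b (i + 1)
  have hjn : j ≤ n := aScan_le cs b (i + 1) (by omega)
  -- all chars in [i, j) have kind b
  have hrun : ∀ k, i ≤ k → k < j → (hk : k < n) → pvIsAlnum cs[k] = b := by
    intro k hk1 hk2 hk3
    rcases Nat.eq_or_lt_of_le hk1 with rfl | hlt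
    · exact hb.symm
    · exact aScan_mem cs b (i + 1) k hlt hk2 hk3
  -- split the range at j
  have hsplit : List.range' (i + 1) (n - 1 - i) =
      List.range' (i + 1) (j - (i + 1)) ++ List.range' j (n - j) := by
    have h1 : i + 1 + 1 * (j - (i + 1)) = j := by omega
    have h2 : j - (i + 1) + (n - j) = n - 1 - i := by omega
    have h3 : List.range' (i + 1) (j - (i + 1)) 1 ++
        List.range' (i + 1 + 1 * (j - (i + 1))) (n - j) 1 =
        List.range' (i + 1) (j - (i + 1) + (n - j)) 1 := List.range'_append
    rw [h1, h2] at h3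
    exact h3.symm
  -- pvPred is false throughout (i, j)
  have hfalse : ∀ k ∈ List.range' (i + 1) (j - (i + 1)), ¬ pvPred cs k = true := by
    intro k hkmem
    rw [List.mem_range'_1] at hkmem
    have hk1 : i + 1 ≤ k := hkmem.1
    have hk2 : k < j := by omega
    have hkn : k < n := by omega
    have hk1n : k - 1 < n := by omega
    rw [pvPred_eq cs k hkn hk1n]
    have e1 : pvIsAlnum cs[k] = b := hrun k (by omega) hk2 hkn
    have e2 : pvIsAlnum cs[k - 1] = b := hrun (k - 1) (by omega) (by omega) hk1n
    simp [e1, e2]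
  rw [hsplit, List.filter_append, List.filter_eq_nil_iff.mpr hfalse, List.nil_append]
  by_cases hjlt : j < n
  · -- boundary at j: pred j is true
    have hstep : List.range' j (n - j) = j :: List.range' (j + 1) (n - 1 - j) := by
      have : n - j = (n - 1 - j) + 1 := by omega
      rw [this, List.range'_succ]
    have hpj : pvPred cs j = true := by
      rw [pvPred_eq cs j hjlt (by omega)]
      have e2 : pvIsAlnum cs[j - 1] = b := hrun (j - 1) (by omega) (by omega) (by omega)
      have e1 : ¬ pvIsAlnum cs[j] = b := aScan_stop cs b (i + 1) hjlt
      simp [e2]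
      exact fun hc => absurd hc e1
    rw [hstep, List.filter_cons_of_pos hpj, List.cons_append, pairsTok_cons]
    rw [aLoop_eq_pairsTok cs j hjlt]
  · -- j = n: last token reaches the end
    have hje : j = n := by omega
    have hre : List.range' j (n - j) = [] := by rw [hje]; simp
    rw [hre, List.filter_nil, List.nil_append, pairsTok_cons]
    have hnil : aLoop cs n = [] := by rw [aLoop, dif_neg (by omega)]
    rw [hje, hnil]
    simp [pairsTok]
termination_by cs.length - i
decreasing_by
  rw [← hb, ← hj]
  omega

theorem tokenize_normal_py_spec : Claim_equal_tokenize_normal_py := by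
  intro text _
  unfold Spec_tokenize_normal_py tokenize_normal_py tokenize_normal_py_alt
  by_cases h0 : text.toList.length = 0
  · rw [if_pos h0, aLoop, dif_neg (by omega)]
  · rw [if_neg h0, aLoop_eq_pairsTok text.toList 0 (by omega)]
    simp only [Nat.sub_zero, Nat.zero_add]
    rfl
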